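-- pv_equiv track=rewrite | github.com/bw5io/aoc2023 | day5/sol_2.py | parse_seeds
-- ===== SOURCE A (Python) =====
-- def parse_seeds(input_list):
--     seeds_range_list = []
--     seeds_range = []
--     flag = False
--     for i in input_list:
--         if flag == True:
--             seeds_range.append(seeds_range[0]+i-1)
--             seeds_range_list.append(seeds_range)
--             seeds_range = []
--             flag = False
--         else:
--             seeds_range.append(i)
--             flag = True
--     return seeds_range_list
-- ===== SOURCE B (Python) =====
-- def parse_seeds(input_list):
--     # Stage 1: group the flat list by pair index (i // 2) into a dict of buckets.
--     groups = {}
--     for idx, value in enumerate(input_list):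
--         key = idx // 2
--         groups[key] = groups.get(key, []) + [value]
--     # Stage 2: complete buckets [start, length] become [start, start+length-1];
--     # an unpaired trailing singleton bucket is dropped.
--     return [[g[0], g[0] + g[1] - 1] for g in groups.values() if len(g) == 2]
-- ===== Notes on version B (the rewrite author's own statement) =====
-- stated objective: alternative
-- what changed: Replaces A's one-pass boolean-flag state machine with a two-stage grouping algorithm: first bucket every element by its pair index (idx // 2) into a dict, then transform the complete two-element buckets into [start, start+length-1], dropping any trailing singleton bucket.
import Mathlib
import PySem

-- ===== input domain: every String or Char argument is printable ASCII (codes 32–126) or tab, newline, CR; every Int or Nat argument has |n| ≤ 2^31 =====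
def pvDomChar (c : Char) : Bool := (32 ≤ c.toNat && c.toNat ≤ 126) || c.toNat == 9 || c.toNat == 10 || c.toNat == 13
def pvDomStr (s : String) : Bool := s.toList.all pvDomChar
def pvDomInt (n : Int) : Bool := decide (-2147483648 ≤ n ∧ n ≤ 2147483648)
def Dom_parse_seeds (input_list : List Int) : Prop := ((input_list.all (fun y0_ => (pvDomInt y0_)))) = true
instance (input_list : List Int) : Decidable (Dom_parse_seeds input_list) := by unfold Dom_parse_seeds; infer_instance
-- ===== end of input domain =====

-- B replaces A's boolean-flag state machine with a two-stage grouping algorithm (dict keyed by idx // 2, then transform complete buckets); alternative decomposition, same cost.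


-- ===== PORT A =====
-- Loop state: (seeds_range_list, seeds_range, flag); seeds_range[0] is ported as headI
-- (exact here: when flag is true, seeds_range is nonempty, so Python never raises).
def parse_seeds (input_list : List Int) : List (List Int) :=
  (input_list.foldl
    (fun (st : List (List Int) × List Int × Bool) i =>
      let (seeds_range_list, seeds_range, flag) := st
      if flag = true then
        (seeds_range_list ++ [seeds_range ++ [seeds_range.headI + i - 1]], [], false)
      else
        (seeds_range_list, seeds_range ++ [i], true))
    ([], [], false)).1

-- ===== PORT B =====
-- Stage 1: bucket the elements by pair index idx // 2 into a dict
-- (groups[key] = groups.get(key, []) + [value] is Dict.modify key [] (· ++ [value])).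
-- Stage 2: complete two-element buckets [start, length] become [start, start+length-1]
-- (g[0]/g[1] ported as pyGetD, exact here: the filter guarantees length 2, so Python never raises).
def parse_seeds_alt (input_list : List Int) : List (List Int) :=
  let groups :=
    (PySem.List.enumerate input_list).foldl
      (fun (d : PySem.Dict Int (List Int)) p =>
        d.modify (PySem.Int.floordiv p.1 2) [] (· ++ [p.2]))
      PySem.Dict.empty
  (groups.values.filter (fun g => g.length == 2)).map
    (fun g => [PySem.List.pyGetD g 0 0,
               PySem.List.pyGetD g 0 0 + PySem.List.pyGetD g 1 0 - 1])

-- ===== PRECONDITION & SPEC =====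
def Spec_parse_seeds (input_list : List Int) (out : List (List Int)) : Prop := out = parse_seeds_alt input_list
instance (input_list : List Int) (out : List (List Int)) : Decidable (Spec_parse_seeds input_list out) := by unfold Spec_parse_seeds; infer_instance

-- ===== CLAIM (what is proved, stated in full; the proofs are below) =====
def Claim_equal_parse_seeds : Prop := ∀ (input_list : List Int), Dom_parse_seeds input_list → Spec_parse_seeds input_list (parse_seeds input_list)

-- ===== LEMMAS AND PROOFS =====

-- Common yardstick: the list chunked into consecutive blocks of (at most) two.
def pvChunks (xs : List Int) : List (List Int) :=
  match xs with
  | a :: b :: rest => [a, b] :: pvChunks rest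
  | [a] => [[a]]
  | [] => []

-- A's loop produces exactly the complete chunks, transformed.
theorem parse_seeds_loop_eq (xs : List Int) : ∀ srl : List (List Int),
    (xs.foldl
      (fun (st : List (List Int) × List Int × Bool) i =>
        let (seeds_range_list, seeds_range, flag) := st
        if flag = true then
          (seeds_range_list ++ [seeds_range ++ [seeds_range.headI + i - 1]], [], false)
        else
          (seeds_range_list, seeds_range ++ [i], true))
      (srl, [], false)).1
    = srl ++ ((pvChunks xs).filter (fun g => g.length == 2)).map
        (fun g => [PySem.List.pyGetD g 0 0,
                   PySem.List.pyGetD g 0 0 + PySem.List.pyGetD g 1 0 - 1]) := by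
  induction xs using pvChunks.induct with
  | case1 a b rest ih =>
      intro srl
      simp [List.foldl, pvChunks, ih, PySem.List.pyGetD, PySem.List.pyGet?, PySem.List.pyIdx?]
  | case2 a =>
      intro srl
      simp [List.foldl, pvChunks]
  | case3 =>
      intro srl
      simp [pvChunks]

-- The chunks each carry their pair index as dict key.
def pvKeyed (m : Int) (cs : List (List Int)) : List (Int × List Int) :=
  match cs with
  | [] => []
  | c :: rest => (m, c) :: pvKeyed (m + 1) rest

theorem pvKeyed_map_snd (cs : List (List Int)) : ∀ m, (pvKeyed m cs).map (·.2) = cs := by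
  induction cs with
  | nil => intro m; simp [pvKeyed]
  | cons c rest ih => intro m; simp [pvKeyed, ih]

theorem pvFloordiv_two_mul (m : Int) : PySem.Int.floordiv (2 * m) 2 = m := by
  rw [PySem.Int.floordiv_eq_ediv_of_pos (by norm_num)]; omega

theorem pvFloordiv_two_mul_add_one (m : Int) : PySem.Int.floordiv (2 * m + 1) 2 = m := by
  rw [PySem.Int.floordiv_eq_ediv_of_pos (by norm_num)]; omega

-- Invariant of B's grouping loop: starting from a dict whose keys are all below m,
-- processing the elements enumerated from index 2*m appends exactly the keyed chunks.
theorem parse_seeds_alt_loop_eq (xs : List Int) : ∀ (m : Int) (its : List (Int × List Int)),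
    (∀ p ∈ its, p.1 < m) →
    ((PySem.List.enumerate xs (2 * m)).foldl
      (fun (d : PySem.Dict Int (List Int)) p =>
        d.modify (PySem.Int.floordiv p.1 2) [] (· ++ [p.2]))
      (PySem.Dict.mk its)).items
    = its ++ pvKeyed m (pvChunks xs) := by
  induction xs using pvChunks.induct with
  | case1 a b rest ih =>
      intro m its hlt
      have henum : PySem.List.enumerate (a :: b :: rest) (2 * m)
          = (2 * m, a) :: (2 * m + 1, b) :: PySem.List.enumerate rest (2 * (m + 1)) := by
        simp [PySem.List.enumerate]; ring_nf
      have hnc : (PySem.Dict.mk its).contains m = false := by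
        simp only [PySem.Dict.contains, List.any_eq_false]
        intro p hp
        have := hlt p hp
        simp only [beq_iff_eq]
        omega
      have hfind : List.find? (fun p => p.1 == m) its = none := by
        rw [List.find?_eq_none]
        intro p hp
        have := hlt p hp
        simp only [beq_iff_eq]
        omega
      rw [henum]
      simp only [List.foldl_cons, pvFloordiv_two_mul, pvFloordiv_two_mul_add_one]
      -- first modify: key m is fresh, so it appends (m, [a])
      have h1 : (PySem.Dict.mk its).modify m [] (· ++ [a])
          = PySem.Dict.mk (its ++ [(m, [a])]) := by
        simp [PySem.Dict.modify, PySem.Dict.insert, hnc, PySem.Dict.getD,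
              PySem.Dict.get?, hfind]
      -- second modify: key m is present (last), so it is overwritten in place
      have h2 : (PySem.Dict.mk (its ++ [(m, [a])])).modify m [] (· ++ [b])
          = PySem.Dict.mk (its ++ [(m, [a, b])]) := by
        have hc : (PySem.Dict.mk (its ++ [(m, [a])])).contains m = true := by
          simp [PySem.Dict.contains]
        have hg : (PySem.Dict.mk (its ++ [(m, [a])])).getD m [] = [a] := by
          simp [PySem.Dict.getD, PySem.Dict.get?, List.find?_append, hfind]
        rw [PySem.Dict.modify, hg, PySem.Dict.insert]
        simp only [hc, if_true]
        congr 1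
        rw [List.map_append]
        congr 1
        · rw [List.map_congr_left (g := id) ?_, List.map_id]
          intro p hp
          have := hlt p hp
          have hne : (p.1 == m) = false := by simp only [beq_eq_false_iff_ne]; omega
          simp [hne]
        · simp
      rw [h1, h2, ih (m + 1) (its ++ [(m, [a, b])])
            (by intro p hp
                rcases List.mem_append.mp hp with h | h
                · have := hlt p h; omega
                · simp only [List.mem_singleton] at h; subst h; omega)]
      simp [pvChunks, pvKeyed]
  | case2 a =>
      intro m its hlt
      have hnc : List.find? (fun p => p.1 == m) its = none := by
        rw [List.find?_eq_none]
        intro p hp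
        have := hlt p hp
        simp only [beq_iff_eq]
        omega
      have hnc' : (PySem.Dict.mk its).contains m = false := by
        simp only [PySem.Dict.contains, List.any_eq_false]
        intro p hp
        have := hlt p hp
        simp only [beq_iff_eq]
        omega
      simp [PySem.List.enumerate, PySem.Dict.modify,
            PySem.Dict.insert, hnc', PySem.Dict.getD, PySem.Dict.get?, hnc,
            pvChunks, pvKeyed]
  | case3 =>
      intro m its hlt
      simp [PySem.List.enumerate, pvChunks, pvKeyed]

-- B computes the transformed complete chunks.
theorem parse_seeds_alt_eq (xs : List Int) :
    parse_seeds_alt xs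
    = ((pvChunks xs).filter (fun g => g.length == 2)).map
        (fun g => [PySem.List.pyGetD g 0 0,
                   PySem.List.pyGetD g 0 0 + PySem.List.pyGetD g 1 0 - 1]) := by
  unfold parse_seeds_alt
  have h0 : PySem.List.enumerate xs 0 = PySem.List.enumerate xs (2 * 0) := by norm_num
  have := parse_seeds_alt_loop_eq xs 0 [] (by simp)
  simp only [h0]
  have hempty : (PySem.Dict.empty : PySem.Dict Int (List Int)) = PySem.Dict.mk [] := rfl
  rw [hempty]
  simp only [PySem.Dict.values, this, List.nil_append, pvKeyed_map_snd]

-- ===== VERDICT (by name: the statement is the Claim_ definition above) =====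
theorem parse_seeds_spec : Claim_equal_parse_seeds := by
  intro xs _
  unfold Spec_parse_seeds parse_seeds
  rw [parse_seeds_alt_eq]
  simpa using parse_seeds_loop_eq xs []
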